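-- pv_equiv track=rewrite | github.com/E-Williamson121/Forced-Crosswordles | forced_crosswordles_analysis.py | bucket_puzzles_by_info
-- ===== SOURCE A (Python) =====
-- def numtoternary(x):
--     nums = []
--     while x > 0:
--         x, r = divmod(x, 3)
--         nums.append(r)
--     while len(nums) < 5: nums.append(0)
--     return nums[::-1]
--
-- def sort_dict(mydict):
--     sorted_dict = {}
--     for key in sorted(mydict):
--         sorted_dict[key] = mydict[key]
--     return sorted_dict
--
-- def bucket_puzzles_by_info(puzzles):
--     number_puzzles = {}
--     number_counts = {}
--     for puzzle in puzzles:
--         words, nums = puzzle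
--         s = sum(map(lambda x: sum(numtoternary(x)), nums))
--         if s in number_puzzles.keys():
--             number_puzzles[s].append(puzzle)
--             number_counts[s] += 1
--         else:
--             number_puzzles[s] = [puzzle]
--             number_counts[s] = 1
--     return number_puzzles, sort_dict(number_counts)
-- ===== SOURCE B (Python) =====
-- def bucket_puzzles_by_info(puzzles):
--     def digitsum(n):
--         s = 0
--         while n > 0:
--             s += n % 3
--             n //= 3
--         return s
--     keyed = [(sum(digitsum(x) for x in p[1]), p) for p in puzzles]
--     seen = []
--     for k, _ in keyed:
--         if k not in seen:
--             seen.append(k)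
--     number_puzzles = {k: [p for kk, p in keyed if kk == k] for k in seen}
--     counts = {k: len(number_puzzles[k]) for k in sorted(seen)}
--     return number_puzzles, counts
-- ===== Notes on version B (the rewrite author's own statement) =====
-- stated objective: alternative
-- what changed: B replaces A's single-pass mutation of two parallel dicts by staged passes: it first tags every puzzle with its key, then collects the distinct keys in first-occurrence order, then builds each bucket by filtering the tagged list per key (a group-by comprehension) and derives the counts as bucket lengths over the sorted keys; the digit sum is an accumulator loop instead of a padded reversed digit list.
import Mathlib
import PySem

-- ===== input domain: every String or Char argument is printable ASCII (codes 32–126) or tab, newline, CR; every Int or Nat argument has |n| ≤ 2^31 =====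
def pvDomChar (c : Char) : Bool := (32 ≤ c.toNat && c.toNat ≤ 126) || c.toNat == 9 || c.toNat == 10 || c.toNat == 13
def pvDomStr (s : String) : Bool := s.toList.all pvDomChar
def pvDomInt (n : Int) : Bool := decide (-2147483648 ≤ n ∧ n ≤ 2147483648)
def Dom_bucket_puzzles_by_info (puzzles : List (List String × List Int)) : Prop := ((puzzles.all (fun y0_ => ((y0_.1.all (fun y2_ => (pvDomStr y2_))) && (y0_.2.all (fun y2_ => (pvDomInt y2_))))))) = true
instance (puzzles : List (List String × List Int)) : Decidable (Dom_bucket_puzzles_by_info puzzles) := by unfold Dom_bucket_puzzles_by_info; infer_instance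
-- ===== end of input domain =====

-- B replaces A's one-pass mutation of two parallel dicts by staged passes: tag each puzzle
-- with its key, dedup the keys in first-occurrence order, build each bucket by filtering the
-- tagged list per key, and derive counts as bucket lengths over the sorted keys (alternative).

-- ===== PORT A =====
-- while x > 0: x, r = divmod(x, 3); nums.append(r)
def numtoternaryLoop (x : Int) : List Int :=
  if h : 0 < x then
    PySem.Int.mod x 3 :: numtoternaryLoop (PySem.Int.floordiv x 3)
  else []
termination_by x.toNat
decreasing_by
  rw [PySem.Int.floordiv_eq_ediv_of_pos (by norm_num : (0:Int) < 3)]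
  omega

def numtoternary (x : Int) : List Int :=
  let nums := numtoternaryLoop x
  -- while len(nums) < 5: nums.append(0)
  let nums2 := nums ++ List.replicate (5 - nums.length) 0
  nums2.reverse

-- sort_dict: rebuild the dict over sorted keys; mydict[key] with key ∈ keys is exact as getD _ 0
def sort_dict (d : PySem.Dict Int Int) : PySem.Dict Int Int :=
  (PySem.List.sorted d.keys (fun k => k)).foldl
    (fun sd k => sd.insert k (d.getD k 0)) PySem.Dict.empty

def bucket_puzzles_by_info (puzzles : List (List String × List Int)) :
    (List (Int × List (List String × List Int))) × (List (Int × Int)) :=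
  let st := puzzles.foldl
    (fun (st : PySem.Dict Int (List (List String × List Int)) × PySem.Dict Int Int) puzzle =>
      let s := (puzzle.2.map (fun x => (numtoternary x).sum)).sum
      if st.1.contains s then
        (st.1.modify s [] (· ++ [puzzle]), st.2.modify s 0 (· + 1))
      else
        (st.1.insert s [puzzle], st.2.insert s 1))
    (PySem.Dict.empty, PySem.Dict.empty)
  (st.1.items, (sort_dict st.2).items)

-- ===== PORT B =====
-- def digitsum(n): s = 0; while n > 0: s += n % 3; n //= 3; return s
def digitsumLoop (s n : Int) : Int :=
  if h : 0 < n then digitsumLoop (s + PySem.Int.mod n 3) (PySem.Int.floordiv n 3) else s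
termination_by n.toNat
decreasing_by
  rw [PySem.Int.floordiv_eq_ediv_of_pos (by norm_num : (0:Int) < 3)]
  omega

def digitsum (n : Int) : Int := digitsumLoop 0 n

def bucket_puzzles_by_info_alt (puzzles : List (List String × List Int)) :
    (List (Int × List (List String × List Int))) × (List (Int × Int)) :=
  -- keyed = [(sum(digitsum(x) for x in p[1]), p) for p in puzzles]
  let keyed := puzzles.map (fun p => ((p.2.map digitsum).sum, p))
  -- for k, _ in keyed: if k not in seen: seen.append(k)
  let seen := keyed.foldl (fun acc q => if acc.contains q.1 then acc else acc ++ [q.1]) ([] : List Int)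
  -- {k: [p for kk, p in keyed if kk == k] for k in seen}
  let number_puzzles := seen.foldl
    (fun (d : PySem.Dict Int (List (List String × List Int))) k =>
      d.insert k ((keyed.filter (fun q => q.1 == k)).map (fun q => q.2)))
    PySem.Dict.empty
  -- {k: len(number_puzzles[k]) for k in sorted(seen)}
  let counts := (PySem.List.sorted seen (fun k => k)).foldl
    (fun (d : PySem.Dict Int Int) k => d.insert k ((number_puzzles.getD k []).length : Int))
    PySem.Dict.empty
  (number_puzzles.items, counts.items)

-- ===== PRECONDITION & SPEC =====
def Spec_bucket_puzzles_by_info (puzzles : List (List String × List Int)) (out : (List (Int × List (List String × List Int))) × (List (Int × Int))) : Prop := out = bucket_puzzles_by_info_alt puzzles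
instance (puzzles : List (List String × List Int)) (out : (List (Int × List (List String × List Int))) × (List (Int × Int))) : Decidable (Spec_bucket_puzzles_by_info puzzles out) := by unfold Spec_bucket_puzzles_by_info; infer_instance

-- ===== CLAIM (what is proved, stated in full; the proofs are below) =====
def Claim_equal_bucket_puzzles_by_info : Prop := ∀ (puzzles : List (List String × List Int)), Dom_bucket_puzzles_by_info puzzles → Spec_bucket_puzzles_by_info puzzles (bucket_puzzles_by_info puzzles)

-- ===== LEMMAS AND PROOFS =====

-- A's bucketing key of a puzzle
def pvKey (p : List String × List Int) : Int := (p.2.map (fun x => (numtoternary x).sum)).sum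

-- the unified single-dict grouping step both ports are reduced to
def groupStep (g : PySem.Dict Int (List (List String × List Int)))
    (p : List String × List Int) : PySem.Dict Int (List (List String × List Int)) :=
  g.insert (pvKey p) (g.getD (pvKey p) [] ++ [p])

-- B's distinct-keys-in-first-occurrence-order step, expressed on puzzles
def seenStep (acc : List Int) (p : List String × List Int) : List Int :=
  if acc.contains (pvKey p) then acc else acc ++ [pvKey p]

theorem digitsumLoop_eq (s x : Int) :
    digitsumLoop s x = s + (numtoternaryLoop x).sum := by
  fun_induction digitsumLoop s x with
  | case1 s x h ih =>
    rw [numtoternaryLoop]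
    simp only [h, dif_pos, List.sum_cons, ih]
    ring
  | case2 s x h =>
    rw [numtoternaryLoop]
    simp [h]

theorem digitsum_eq (x : Int) : digitsum x = (numtoternary x).sum := by
  simp [digitsum, digitsumLoop_eq, numtoternary]

-- B's key equals A's key
theorem keyB_eq (p : List String × List Int) : (p.2.map digitsum).sum = pvKey p := by
  have : digitsum = fun x => (numtoternary x).sum := funext digitsum_eq
  rw [pvKey, this]

-- the counts dict is the lengths image of the puzzles dict
def pvToLen (q : Int × List (List String × List Int)) : Int × Int := (q.1, (q.2.length : Int))

theorem keys_counts (dP : PySem.Dict Int (List (List String × List Int)))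
    (dC : PySem.Dict Int Int) (hC : dC.items = dP.items.map pvToLen) :
    dC.keys = dP.keys := by
  simp only [PySem.Dict.keys, hC, List.map_map]
  rfl

theorem contains_counts (dP : PySem.Dict Int (List (List String × List Int)))
    (dC : PySem.Dict Int Int) (hC : dC.items = dP.items.map pvToLen) (k : Int) :
    dC.contains k = dP.contains k := by
  rw [PySem.Dict.contains_eq_decide_mem_keys, PySem.Dict.contains_eq_decide_mem_keys,
    keys_counts dP dC hC]

theorem getD_counts (dP : PySem.Dict Int (List (List String × List Int)))
    (dC : PySem.Dict Int Int) (hC : dC.items = dP.items.map pvToLen)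
    (hN : dP.keys.Nodup) (k : Int) :
    dC.getD k 0 = ((dP.getD k []).length : Int) := by
  have hNC : dC.keys.Nodup := by rw [keys_counts dP dC hC]; exact hN
  by_cases h : dP.contains k = true
  · have hs : (dP.get? k).isSome = true := by
      rw [← PySem.Dict.contains_eq_isSome_get?]; exact h
    rcases Option.isSome_iff_exists.mp hs with ⟨v, hv⟩
    have hmP : (k, v) ∈ dP.items := PySem.Dict.mem_items_of_get?_eq_some dP hv
    have hmC : (k, (v.length : Int)) ∈ dC.items := by
      rw [hC]
      exact List.mem_map.mpr ⟨(k, v), hmP, rfl⟩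
    rw [PySem.Dict.getD_of_mem_items dC hmC hNC 0,
      PySem.Dict.getD_of_mem_items dP hmP hN []]
  · have h' : dC.contains k = false := by
      rw [contains_counts dP dC hC]; simpa using h
    rw [PySem.Dict.getD_of_not_contains dP [] (by simpa using h),
      PySem.Dict.getD_of_not_contains dC 0 h']
    rfl

-- one loop step preserves the lengths-image relation
theorem counts_step (dP : PySem.Dict Int (List (List String × List Int)))
    (dC : PySem.Dict Int Int) (hC : dC.items = dP.items.map pvToLen)
    (hN : dP.keys.Nodup) (s : Int) (p : List String × List Int) :
    (dC.insert s (dC.getD s 0 + 1)).items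
      = (dP.insert s (dP.getD s [] ++ [p])).items.map pvToLen := by
  by_cases h : dP.contains s = true
  · have h' : dC.contains s = true := by rw [contains_counts dP dC hC]; exact h
    rw [PySem.Dict.items_insert_of_contains dC _ h',
      PySem.Dict.items_insert_of_contains dP _ h, hC, List.map_map, List.map_map]
    apply List.map_congr_left
    intro q hq
    by_cases hk : q.1 = s
    · simp only [Function.comp, pvToLen, hk, beq_self_eq_true, if_true]
      have : dP.getD s [] = q.2 := by
        have : (s, q.2) ∈ dP.items := by rw [← hk]; exact hq
        exact PySem.Dict.getD_of_mem_items dP this hN []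
      rw [getD_counts dP dC hC hN s, this]
      simp only [List.length_append, List.length_cons, List.length_nil]
      push_cast
      ring
    · simp [Function.comp, pvToLen, hk]
  · have h' : dC.contains s = false := by
      rw [contains_counts dP dC hC]; simpa using h
    rw [PySem.Dict.items_insert_of_not_contains dC _ h',
      PySem.Dict.items_insert_of_not_contains dP _ (by simpa using h), hC, List.map_append,
      PySem.Dict.getD_of_not_contains dC 0 h',
      PySem.Dict.getD_of_not_contains dP [] (by simpa using h)]
    rfl

-- A's paired fold tracks the single grouping fold and its lengths image
theorem loop_inv (puzzles : List (List String × List Int))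
    (dP : PySem.Dict Int (List (List String × List Int))) (dC : PySem.Dict Int Int)
    (hC : dC.items = dP.items.map pvToLen) (hN : dP.keys.Nodup) :
    (puzzles.foldl
      (fun (st : PySem.Dict Int (List (List String × List Int)) × PySem.Dict Int Int) puzzle =>
        let s := (puzzle.2.map (fun x => (numtoternary x).sum)).sum
        if st.1.contains s then
          (st.1.modify s [] (· ++ [puzzle]), st.2.modify s 0 (· + 1))
        else
          (st.1.insert s [puzzle], st.2.insert s 1)) (dP, dC)).1
      = puzzles.foldl groupStep dP
    ∧ (puzzles.foldl
      (fun (st : PySem.Dict Int (List (List String × List Int)) × PySem.Dict Int Int) puzzle =>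
        let s := (puzzle.2.map (fun x => (numtoternary x).sum)).sum
        if st.1.contains s then
          (st.1.modify s [] (· ++ [puzzle]), st.2.modify s 0 (· + 1))
        else
          (st.1.insert s [puzzle], st.2.insert s 1)) (dP, dC)).2.items
      = (puzzles.foldl groupStep dP).items.map pvToLen
    ∧ (puzzles.foldl groupStep dP).keys.Nodup := by
  induction puzzles generalizing dP dC with
  | nil => exact ⟨rfl, hC, hN⟩
  | cons p ps ih =>
    simp only [List.foldl_cons]
    set s := (p.2.map (fun x => (numtoternary x).sum)).sum with hs
    have hgs : groupStep dP p = dP.insert s (dP.getD s [] ++ [p]) := rfl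
    have hN' : (dP.insert s (dP.getD s [] ++ [p])).keys.Nodup :=
      PySem.Dict.nodup_keys_insert dP s _ hN
    by_cases h : dP.contains s = true
    · have h' : dC.contains s = true := by rw [contains_counts dP dC hC]; exact h
      simp only [h, if_true]
      have hA1 : dP.modify s [] (· ++ [p]) = dP.insert s (dP.getD s [] ++ [p]) := rfl
      have hA2 : dC.modify s 0 (· + 1) = dC.insert s (dC.getD s 0 + 1) := rfl
      rw [hA1, hA2, hgs]
      exact ih _ _ (counts_step dP dC hC hN s p) hN'
    · simp only [h, if_false]
      have hA1 : dP.insert s [p] = dP.insert s (dP.getD s [] ++ [p]) := by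
        rw [PySem.Dict.getD_of_not_contains dP [] (by simpa using h), List.nil_append]
      have hA2 : dC.insert s 1 = dC.insert s (dC.getD s 0 + 1) := by
        rw [PySem.Dict.getD_of_not_contains dC 0
          (by rw [contains_counts dP dC hC]; simpa using h), zero_add]
      rw [hA1, hA2, hgs]
      exact ih _ _ (counts_step dP dC hC hN s p) hN'

-- the grouping fold, characterised as buckets over the distinct keys in first-occurrence order
theorem group_inv (rest : List (List String × List Int))
    (g : PySem.Dict Int (List (List String × List Int))) (S : List Int)
    (b : Int → List (List String × List Int))
    (hI : g.items = S.map (fun k => (k, b k))) (hN : S.Nodup)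
    (h0 : ∀ k, k ∉ S → b k = []) :
    (rest.foldl groupStep g).items
      = (rest.foldl seenStep S).map
          (fun k => (k, b k ++ rest.filter (fun p => pvKey p == k)))
    ∧ (rest.foldl seenStep S).Nodup := by
  induction rest generalizing g S b with
  | nil =>
    refine ⟨?_, hN⟩
    simpa using hI
  | cons p ps ih =>
    have hkeys : g.keys = S := by
      simp only [PySem.Dict.keys, hI, List.map_map]
      simp [Function.comp_def]
    have hcont : g.contains (pvKey p) = decide (pvKey p ∈ S) := by
      rw [PySem.Dict.contains_eq_decide_mem_keys, hkeys]
    simp only [List.foldl_cons]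
    by_cases hm : pvKey p ∈ S
    · -- existing key: bucket at pvKey p grows by p
      have hc : g.contains (pvKey p) = true := by rw [hcont]; simpa using hm
      have hgD : g.getD (pvKey p) [] = b (pvKey p) := by
        refine PySem.Dict.getD_of_mem_items g ?_ (hkeys ▸ hN) []
        rw [hI]; exact List.mem_map.mpr ⟨pvKey p, hm, rfl⟩
      have hstep : groupStep g p = g.insert (pvKey p) (b (pvKey p) ++ [p]) := by
        rw [groupStep, hgD]
      have hseen : seenStep S p = S := by simp [seenStep, hm]
      rw [hstep, hseen]
      have hI' : (g.insert (pvKey p) (b (pvKey p) ++ [p])).items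
          = S.map (fun k => (k, if k = pvKey p then b (pvKey p) ++ [p] else b k)) := by
        rw [PySem.Dict.items_insert_of_contains g _ hc, hI, List.map_map]
        apply List.map_congr_left
        intro k hkS
        by_cases hk : k = pvKey p
        · subst hk; simp [Function.comp_def]
        · have hne : (k == pvKey p) = false := by simpa using hk
          simp [Function.comp, hne, hk]
      obtain ⟨h1, h2⟩ := ih _ S _ hI' hN
        (by intro k hk; have : k ≠ pvKey p := fun e => hk (e ▸ hm); simp [this, h0 k hk])
      refine ⟨?_, h2⟩
      rw [h1]
      apply List.map_congr_left
      intro k _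
      by_cases hk : k = pvKey p
      · subst hk
        simp [List.filter_cons]
      · have hne : (pvKey p == k) = false := by simpa using fun e => hk e.symm
        simp [List.filter_cons, hne, hk]
    · -- new key: appended with bucket [p]
      have hc : g.contains (pvKey p) = false := by rw [hcont]; simpa using hm
      have hstep : groupStep g p = g.insert (pvKey p) [p] := by
        rw [groupStep, PySem.Dict.getD_of_not_contains g [] hc, List.nil_append]
      have hseen : seenStep S p = S ++ [pvKey p] := by simp [seenStep, hm]
      rw [hstep, hseen]
      have hI' : (g.insert (pvKey p) [p]).items
          = (S ++ [pvKey p]).map (fun k => (k, if k = pvKey p then [p] else b k)) := by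
        rw [PySem.Dict.items_insert_of_not_contains g _ hc, hI, List.map_append,
          List.map_cons, List.map_nil]
        congr 1
        · apply List.map_congr_left
          intro k hkS
          have hne : k ≠ pvKey p := fun e => hm (e ▸ hkS)
          simp [hne]
        · simp
      have hN2 : (S ++ [pvKey p]).Nodup := by
        simp [List.nodup_append, hN]
        exact fun a ha e => hm (e ▸ ha)
      obtain ⟨h1, h2⟩ := ih _ _ _ hI' hN2
        (by
          intro k hk
          have hk1 : k ∉ S := fun e => hk (List.mem_append.mpr (Or.inl e))
          have hk2 : k ≠ pvKey p := fun e => hk (by simp [e])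
          simp [hk2, h0 k hk1])
      refine ⟨?_, h2⟩
      rw [h1]
      apply List.map_congr_left
      intro k _
      by_cases hk : k = pvKey p
      · subst hk
        simp [List.filter_cons, h0 _ hm]
      · have hne : (pvKey p == k) = false := by simpa using fun e => hk e.symm
        simp [List.filter_cons, hne, hk]

-- sort_dict of the counts dict, as the sorted-keys map of bucket lengths
theorem sort_dict_counts (g : PySem.Dict Int (List (List String × List Int)))
    (dC : PySem.Dict Int Int) (hC : dC.items = g.items.map pvToLen) (hN : g.keys.Nodup) :
    (sort_dict dC).items
      = (PySem.List.sorted g.keys (fun k => k)).map (fun k => (k, ((g.getD k []).length : Int))) := by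
  have hks : dC.keys = g.keys := keys_counts g dC hC
  have hnd : (PySem.List.sorted dC.keys (fun k => k) false).Nodup :=
    (PySem.List.sorted_perm dC.keys (fun k => k) false).nodup_iff.mpr (hks ▸ hN)
  unfold sort_dict
  rw [PySem.Dict.items_foldl_insert_fresh (PySem.List.sorted dC.keys (fun k => k))
    (fun k => k) (fun k => dC.getD k 0) PySem.Dict.empty
    (fun a _ => PySem.Dict.contains_empty a) (by simpa using hnd)]
  rw [show (PySem.Dict.empty : PySem.Dict Int Int).items = [] from rfl, List.nil_append, hks]
  apply List.map_congr_left
  intro k _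
  rw [getD_counts g dC hC hN k]

-- ===== VERDICT (by name: the statement is the Claim_ definition above) =====
theorem bucket_puzzles_by_info_spec : Claim_equal_bucket_puzzles_by_info := by
  intro puzzles _
  show bucket_puzzles_by_info puzzles = bucket_puzzles_by_info_alt puzzles
  obtain ⟨hA1, hA2, hA3⟩ := loop_inv puzzles PySem.Dict.empty PySem.Dict.empty rfl
    PySem.Dict.nodup_keys_empty
  obtain ⟨hG1, hG2⟩ := group_inv puzzles PySem.Dict.empty [] (fun _ => [])
    rfl List.nodup_nil (fun _ _ => rfl)
  have hG1' : (puzzles.foldl groupStep PySem.Dict.empty).items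
      = (puzzles.foldl seenStep []).map
          (fun k => (k, puzzles.filter (fun p => pvKey p == k))) := by
    simpa using hG1
  have hkeysA : (puzzles.foldl groupStep PySem.Dict.empty).keys
      = puzzles.foldl seenStep [] := by
    simp only [PySem.Dict.keys, hG1', List.map_map]
    simp [Function.comp_def]
  -- B's seen fold over keyed is the seenStep fold over puzzles
  have hseen : (puzzles.map (fun p => ((p.2.map digitsum).sum, p))).foldl
      (fun acc q => if acc.contains q.1 then acc else acc ++ [q.1]) ([] : List Int)
      = puzzles.foldl seenStep [] := by
    rw [List.foldl_map]
    simp only [keyB_eq]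
    rfl
  -- B's per-key bucket is the filter over puzzles
  have hbucket : ∀ k : Int,
      ((puzzles.map (fun p => ((p.2.map digitsum).sum, p))).filter
          (fun q => q.1 == k)).map (fun q => q.2)
        = puzzles.filter (fun p => pvKey p == k) := by
    intro k
    rw [List.filter_map, List.map_map]
    simp only [Function.comp, keyB_eq]
    exact List.map_id _
  -- B's number_puzzles dict equals the grouping fold
  have hBfold : (puzzles.foldl seenStep []).foldl
      (fun (d : PySem.Dict Int (List (List String × List Int))) k =>
        d.insert k (((puzzles.map (fun p => ((p.2.map digitsum).sum, p))).filter
          (fun q => q.1 == k)).map (fun q => q.2)))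
      PySem.Dict.empty = puzzles.foldl groupStep PySem.Dict.empty := by
    apply PySem.Dict.ext
    rw [PySem.Dict.items_foldl_insert_fresh (puzzles.foldl seenStep []) (fun k => k)
      _ PySem.Dict.empty (fun a _ => PySem.Dict.contains_empty a) (by simpa using hG2)]
    rw [hG1', show (PySem.Dict.empty : PySem.Dict Int (List (List String × List Int))).items = []
      from rfl, List.nil_append]
    exact List.map_congr_left fun k _ => by rw [hbucket k]
  have hC : ((PySem.List.sorted (puzzles.foldl seenStep []) (fun k => k)).foldl
      (fun (d : PySem.Dict Int Int) k =>
        d.insert k (((puzzles.foldl groupStep PySem.Dict.empty).getD k []).length : Int))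
      PySem.Dict.empty).items
      = (PySem.List.sorted (puzzles.foldl seenStep []) (fun k => k)).map
          (fun k => (k, (((puzzles.foldl groupStep PySem.Dict.empty).getD k []).length : Int))) := by
    rw [PySem.Dict.items_foldl_insert_fresh _ (fun k => k) _ PySem.Dict.empty
      (fun a _ => PySem.Dict.contains_empty a)
      (by simpa using
        ((PySem.List.sorted_perm (puzzles.foldl seenStep []) (fun k => k) false).nodup_iff.mpr hG2))]
    rfl
  -- assemble
  rw [show bucket_puzzles_by_info_alt puzzles
      = (((puzzles.foldl seenStep []).foldl
          (fun (d : PySem.Dict Int (List (List String × List Int))) k =>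
            d.insert k (((puzzles.map (fun p => ((p.2.map digitsum).sum, p))).filter
              (fun q => q.1 == k)).map (fun q => q.2)))
          PySem.Dict.empty).items,
        ((PySem.List.sorted (puzzles.foldl seenStep []) (fun k => k)).foldl
          (fun (d : PySem.Dict Int Int) k =>
            d.insert k ((((puzzles.foldl seenStep []).foldl
              (fun (d : PySem.Dict Int (List (List String × List Int))) k =>
                d.insert k (((puzzles.map (fun p => ((p.2.map digitsum).sum, p))).filter
                  (fun q => q.1 == k)).map (fun q => q.2)))
              PySem.Dict.empty).getD k []).length : Int))
          PySem.Dict.empty).items)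
    from by rw [bucket_puzzles_by_info_alt]; rw [hseen]]
  rw [hBfold]
  refine Prod.ext ?_ ?_
  · simpa [bucket_puzzles_by_info] using congrArg PySem.Dict.items hA1
  · show (sort_dict (puzzles.foldl
        (fun (st : PySem.Dict Int (List (List String × List Int)) × PySem.Dict Int Int) puzzle =>
          let s := (puzzle.2.map (fun x => (numtoternary x).sum)).sum
          if st.1.contains s then
            (st.1.modify s [] (· ++ [puzzle]), st.2.modify s 0 (· + 1))
          else
            (st.1.insert s [puzzle], st.2.insert s 1))
        (PySem.Dict.empty, PySem.Dict.empty)).2).items = _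
    rw [sort_dict_counts _ _ hA2 hA3, hkeysA, hC]
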